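-- pv_equiv track=rewrite | github.com/alehdezp/alphaswarm-sol | src/alphaswarm_sol/tools/adapters/foundry_adapter.py | extract_trace_info
-- ===== SOURCE A (Python) =====
-- from typing import Any, Dict, List, Optional, Tuple
--
-- def extract_trace_info(logs: List[str]) -> Dict[str, Any]:
--     """Parse stack trace information from logs.
--
--     Args:
--         logs: List of log strings from test execution
--
--     Returns:
--         Dictionary with parsed trace information
--     """
--     trace_info: Dict[str, Any] = {
--         "calls": [],
--         "reverts": [],
--         "events": [],
--         "assertions": [],
--     }
--
--     for log in logs:
--         log_lower = log.lower()
--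
--         # Detect call traces
--         if "call" in log_lower or "->" in log:
--             trace_info["calls"].append(log)
--
--         # Detect reverts
--         if "revert" in log_lower or "fail" in log_lower:
--             trace_info["reverts"].append(log)
--
--         # Detect events
--         if "emit" in log_lower or "event" in log_lower:
--             trace_info["events"].append(log)
--
--         # Detect assertion failures
--         if "assert" in log_lower:
--             trace_info["assertions"].append(log)
--
--     return trace_info
-- ===== SOURCE B (Python) =====
-- from typing import Any, Dict, List
--
--
-- def extract_trace_info(logs: List[str]) -> Dict[str, Any]:
--     """Parse stack trace information from logs via divide-and-conquer:
--     split the range in half, classify each half, concatenate buckets."""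
--
--     def classify(log: str):
--         ll = log.lower()
--         one = [log]
--         return (
--             one if "call" in ll or "->" in log else [],
--             one if "revert" in ll or "fail" in ll else [],
--             one if "emit" in ll or "event" in ll else [],
--             one if "assert" in ll else [],
--         )
--
--     def go(lo: int, hi: int):
--         if hi - lo == 0:
--             return ([], [], [], [])
--         if hi - lo == 1:
--             return classify(logs[lo])
--         mid = (lo + hi) // 2
--         lc, lr, le, la = go(lo, mid)
--         rc, rr, re_, ra = go(mid, hi)
--         return (lc + rc, lr + rr, le + re_, la + ra)
--
--     c, r, e, a = go(0, len(logs))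
--     return {"calls": c, "reverts": r, "events": e, "assertions": a}
-- ===== Notes on version B (the rewrite author's own statement) =====
-- stated objective: alternative
-- what changed: Replaced A's single linear loop mutating a dict of four buckets by a divide-and-conquer over index ranges: split the list in half, recursively bucket each half, and concatenate the four buckets at each merge.
import Mathlib
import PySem

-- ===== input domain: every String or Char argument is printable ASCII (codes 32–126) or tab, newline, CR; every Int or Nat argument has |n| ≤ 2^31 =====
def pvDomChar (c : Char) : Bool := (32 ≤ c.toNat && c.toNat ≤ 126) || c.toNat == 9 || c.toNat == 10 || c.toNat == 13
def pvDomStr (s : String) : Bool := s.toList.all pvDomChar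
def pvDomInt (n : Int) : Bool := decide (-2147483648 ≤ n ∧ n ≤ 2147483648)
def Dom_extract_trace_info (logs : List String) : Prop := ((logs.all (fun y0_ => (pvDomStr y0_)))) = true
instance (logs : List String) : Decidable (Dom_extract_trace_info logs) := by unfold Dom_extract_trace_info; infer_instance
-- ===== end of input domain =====

-- B replaces A's single dict-mutating linear loop by a divide-and-conquer bucketing (split, recurse, concatenate); alternative decomposition, same result.
-- ===== PORT A =====
-- A: build the dict of four empty buckets, then one loop over logs appending each log to every matching bucket.
def extract_trace_info_step (d : PySem.Dict String (List String)) (log : String) : PySem.Dict String (List String) :=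
  let ll := PySem.Str.lower log
  let d := if PySem.Str.isIn "call" ll || PySem.Str.isIn "->" log then d.modify "calls" [] (· ++ [log]) else d
  let d := if PySem.Str.isIn "revert" ll || PySem.Str.isIn "fail" ll then d.modify "reverts" [] (· ++ [log]) else d
  let d := if PySem.Str.isIn "emit" ll || PySem.Str.isIn "event" ll then d.modify "events" [] (· ++ [log]) else d
  if PySem.Str.isIn "assert" ll then d.modify "assertions" [] (· ++ [log]) else d

def extract_trace_info (logs : List String) : List (String × List String) :=
  (logs.foldl extract_trace_info_step
    (PySem.Dict.ofList [("calls", []), ("reverts", []), ("events", []), ("assertions", [])])).items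

-- ===== PORT B =====
-- B: classify one log into a 4-tuple of buckets.
def eti_classify (log : String) : List String × List String × List String × List String :=
  let ll := PySem.Str.lower log
  let one := [log]
  ((if PySem.Str.isIn "call" ll || PySem.Str.isIn "->" log then one else []),
   (if PySem.Str.isIn "revert" ll || PySem.Str.isIn "fail" ll then one else []),
   (if PySem.Str.isIn "emit" ll || PySem.Str.isIn "event" ll then one else []),
   (if PySem.Str.isIn "assert" ll then one else []))

-- B: divide-and-conquer: split the list in half, recurse on the halves, concatenate buckets.
def eti_go (xs : List String) : List String × List String × List String × List String :=
  match h : xs with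
  | [] => ([], [], [], [])
  | [l] => eti_classify l
  | _ :: _ :: _ =>
    let mid := xs.length / 2
    let L := eti_go (xs.take mid)
    let R := eti_go (xs.drop mid)
    (L.1 ++ R.1, L.2.1 ++ R.2.1, L.2.2.1 ++ R.2.2.1, L.2.2.2 ++ R.2.2.2)
termination_by xs.length
decreasing_by
  · simp_all; omega
  · simp_all; omega

def extract_trace_info_alt (logs : List String) : List (String × List String) :=
  let t := eti_go logs
  [("calls", t.1), ("reverts", t.2.1), ("events", t.2.2.1), ("assertions", t.2.2.2)]

-- ===== PRECONDITION & SPEC =====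
def Spec_extract_trace_info (logs : List String) (out : List (String × List String)) : Prop := out = extract_trace_info_alt logs
instance (logs : List String) (out : List (String × List String)) : Decidable (Spec_extract_trace_info logs out) := by unfold Spec_extract_trace_info; infer_instance

-- ===== CLAIM (what is proved, stated in full; the proofs are below) =====
def Claim_equal_extract_trace_info : Prop := ∀ (logs : List String), Dom_extract_trace_info logs → Spec_extract_trace_info logs (extract_trace_info logs)

-- ===== LEMMAS AND PROOFS =====
-- Appending to one fixed bucket of the literal four-bucket dict (specialisations of Dict.modify).
lemma mod_calls (c r e a : List String) (x : String) :
    (PySem.Dict.mk [("calls",c),("reverts",r),("events",e),("assertions",a)]).modify "calls" [] (· ++ [x])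
  = PySem.Dict.mk [("calls",c++[x]),("reverts",r),("events",e),("assertions",a)] := by
  simp [PySem.Dict.modify, PySem.Dict.getD, PySem.Dict.get?_mk_cons, PySem.Dict.insert, PySem.Dict.contains]

lemma mod_reverts (c r e a : List String) (x : String) :
    (PySem.Dict.mk [("calls",c),("reverts",r),("events",e),("assertions",a)]).modify "reverts" [] (· ++ [x])
  = PySem.Dict.mk [("calls",c),("reverts",r++[x]),("events",e),("assertions",a)] := by
  simp [PySem.Dict.modify, PySem.Dict.getD, PySem.Dict.get?_mk_cons, PySem.Dict.insert, PySem.Dict.contains]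

lemma mod_events (c r e a : List String) (x : String) :
    (PySem.Dict.mk [("calls",c),("reverts",r),("events",e),("assertions",a)]).modify "events" [] (· ++ [x])
  = PySem.Dict.mk [("calls",c),("reverts",r),("events",e++[x]),("assertions",a)] := by
  simp [PySem.Dict.modify, PySem.Dict.getD, PySem.Dict.get?_mk_cons, PySem.Dict.insert, PySem.Dict.contains]

lemma mod_assertions (c r e a : List String) (x : String) :
    (PySem.Dict.mk [("calls",c),("reverts",r),("events",e),("assertions",a)]).modify "assertions" [] (· ++ [x])
  = PySem.Dict.mk [("calls",c),("reverts",r),("events",e),("assertions",a++[x])] := by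
  simp [PySem.Dict.modify, PySem.Dict.getD, PySem.Dict.get?_mk_cons, PySem.Dict.insert, PySem.Dict.contains]

-- One loop iteration on the four-bucket dict: each bucket gains [log] iff its condition holds.
lemma extract_trace_info_step_eq (c r e a : List String) (log : String) :
    extract_trace_info_step (PySem.Dict.mk [("calls",c),("reverts",r),("events",e),("assertions",a)]) log
  = PySem.Dict.mk
      [("calls", c ++ if PySem.Str.isIn "call" (PySem.Str.lower log) || PySem.Str.isIn "->" log then [log] else []),
       ("reverts", r ++ if PySem.Str.isIn "revert" (PySem.Str.lower log) || PySem.Str.isIn "fail" (PySem.Str.lower log) then [log] else []),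
       ("events", e ++ if PySem.Str.isIn "emit" (PySem.Str.lower log) || PySem.Str.isIn "event" (PySem.Str.lower log) then [log] else []),
       ("assertions", a ++ if PySem.Str.isIn "assert" (PySem.Str.lower log) then [log] else [])] := by
  unfold extract_trace_info_step
  split_ifs with h1 h2 h3 h4 <;>
    simp_all [mod_calls, mod_reverts, mod_events, mod_assertions]

-- Loop invariant for A: starting from buckets (c, r, e, a), the fold extends each bucket
-- by the corresponding filter of the remaining logs.
lemma extract_trace_info_loop (logs c r e a : List String) :
    logs.foldl extract_trace_info_step
      (PySem.Dict.mk [("calls", c), ("reverts", r), ("events", e), ("assertions", a)])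
  = PySem.Dict.mk
      [("calls", c ++ logs.filter (fun l => PySem.Str.isIn "call" (PySem.Str.lower l) || PySem.Str.isIn "->" l)),
       ("reverts", r ++ logs.filter (fun l => PySem.Str.isIn "revert" (PySem.Str.lower l) || PySem.Str.isIn "fail" (PySem.Str.lower l))),
       ("events", e ++ logs.filter (fun l => PySem.Str.isIn "emit" (PySem.Str.lower l) || PySem.Str.isIn "event" (PySem.Str.lower l))),
       ("assertions", a ++ logs.filter (fun l => PySem.Str.isIn "assert" (PySem.Str.lower l)))] := by
  induction logs generalizing c r e a with
  | nil => simp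
  | cons log rest ih =>
    rw [List.foldl_cons, extract_trace_info_step_eq, ih]
    simp only [List.filter_cons]
    split_ifs <;> simp

-- B's divide-and-conquer computes exactly the four filters (filter distributes over ++).
lemma eti_go_eq (xs : List String) :
    eti_go xs
  = (xs.filter (fun l => PySem.Str.isIn "call" (PySem.Str.lower l) || PySem.Str.isIn "->" l),
     xs.filter (fun l => PySem.Str.isIn "revert" (PySem.Str.lower l) || PySem.Str.isIn "fail" (PySem.Str.lower l)),
     xs.filter (fun l => PySem.Str.isIn "emit" (PySem.Str.lower l) || PySem.Str.isIn "event" (PySem.Str.lower l)),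
     xs.filter (fun l => PySem.Str.isIn "assert" (PySem.Str.lower l))) := by
  induction xs using eti_go.induct with
  | case1 => simp [eti_go]
  | case2 l =>
    simp only [eti_go, eti_classify, List.filter_singleton]
    split_ifs <;> simp_all [Bool.cond_eq_if]
  | case3 xs h1 h2 h3 ih1 ih2 =>
    rw [eti_go]
    rw [ih1, ih2]
    simp [← List.filter_append]

-- ===== VERDICT (by name: the statement is the Claim_ definition above) =====
theorem extract_trace_info_spec : Claim_equal_extract_trace_info := by
  intro logs _
  unfold Spec_extract_trace_info extract_trace_info extract_trace_info_alt
  rw [show PySem.Dict.ofList [("calls", ([] : List String)), ("reverts", []), ("events", []), ("assertions", [])]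
      = PySem.Dict.mk [("calls", []), ("reverts", []), ("events", []), ("assertions", [])] from by decide]
  rw [extract_trace_info_loop, eti_go_eq]
  simp
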